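-- pv_equiv track=rewrite | github.com/jrodriguezgar/FormuLite | shortfx/fxNumeric/number_theory_functions.py | is_powerful_number
-- ===== SOURCE A (Python) =====
-- def is_powerful_number(n: int) -> bool:
--     """Check if n is a powerful number (every prime factor appears ≥ 2 times).
--
--     Args:
--         n: Positive integer.
--
--     Returns:
--         True if n is powerful.
--
--     Raises:
--         TypeError: If n is not an integer.
--         ValueError: If n < 1.
--
--     Usage Example:
--         >>> is_powerful_number(72)
--         True
--
--     Complexity: O(√n)
--     """
--     if not isinstance(n, int):
--         raise TypeError("n must be an integer.")
--     if n < 1: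
--         raise ValueError("n must be positive.")
--     if n == 1:
--         return True
--     temp = n
--     p = 2
--     while p * p <= temp:
--         if temp % p == 0:
--             count = 0
--             while temp % p == 0:
--                 count += 1
--                 temp //= p
--             if count < 2:
--                 return False
--         p += 1
--     return temp == 1
-- ===== SOURCE B (Python) =====
-- def is_powerful_number(n: int) -> bool:
--     """Check if n is powerful by searching a representation n = a*a * b*b*b.
--
--     A positive integer is powerful iff it can be written as a^2 * b^3
--     (every prime exponent e >= 2 splits as e = 2x + 3y with y = e % 2).
--     """
--     if not isinstance(n, int):
--         raise TypeError("n must be an integer.")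
--     if n < 1:
--         raise ValueError("n must be positive.")
--     b = 1
--     while b * b * b <= n:
--         c = b * b * b
--         if n % c == 0:
--             m = n // c
--             a = 1
--             while a * a < m:
--                 a += 1
--             if a * a == m:
--                 return True
--         b += 1
--     return False
-- ===== Notes on version B (the rewrite author's own statement) =====
-- stated objective: alternative
-- what changed: B abandons trial-division factorization entirely: it searches for a representation n = a^2 * b^3 (a positive integer is powerful iff it has one), looping b over cube divisors of n and testing whether the cofactor is a perfect square.
import Mathlib
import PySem

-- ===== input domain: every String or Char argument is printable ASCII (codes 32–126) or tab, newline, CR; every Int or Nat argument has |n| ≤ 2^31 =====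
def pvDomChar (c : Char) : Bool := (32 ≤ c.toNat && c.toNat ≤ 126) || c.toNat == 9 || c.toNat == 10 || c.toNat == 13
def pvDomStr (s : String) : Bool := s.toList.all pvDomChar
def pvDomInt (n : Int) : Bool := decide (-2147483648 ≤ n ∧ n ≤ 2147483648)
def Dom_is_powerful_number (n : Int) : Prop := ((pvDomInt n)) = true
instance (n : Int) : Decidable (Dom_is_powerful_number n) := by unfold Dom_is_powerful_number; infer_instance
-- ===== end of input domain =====

-- B replaces A's trial-division factorization by a search for a representation
-- n = a^2 * b^3 (which exists exactly for the powerful numbers);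
-- objective: alternative (same O(sqrt n) cost).


-- ===== PORT A =====
-- inner 'while temp % p == 0' loop of A: returns (count, temp); fuel is a pure
-- totality guard, large enough on every admitted input (temp shrinks each step)
def stripFactor (fuel : Nat) (p temp count : Int) : Int × Int :=
  match fuel with
  | 0 => (count, temp)
  | fuel + 1 =>
    if PySem.Int.mod temp p = 0 then
      stripFactor fuel p (PySem.Int.floordiv temp p) (count + 1)
    else (count, temp)

-- A's outer 'while p * p <= temp' loop with its interleaved early exit;
-- fuel is again only a totality guard (one unit per outer iteration)
def loopA (fuel : Nat) (p temp : Int) : Bool :=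
  match fuel with
  | 0 => decide (temp = 1)
  | fuel + 1 =>
    if p * p ≤ temp then
      if PySem.Int.mod temp p = 0 then
        let r := stripFactor temp.toNat p temp 0
        if r.1 < 2 then false
        else loopA fuel (p + 1) r.2
      else loopA fuel (p + 1) temp
    else decide (temp = 1)

def is_powerful_number (n : Int) : Bool :=
  if n = 1 then true else loopA n.toNat 2 n

-- ===== PORT B =====
-- B's inner 'while a * a < m' search for an integer square root candidate,
-- followed by the 'a * a == m' test; fuel is a totality guard
def sqLoop (fuel : Nat) (a m : Int) : Bool :=
  match fuel with
  | 0 => decide (a * a = m)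
  | fuel + 1 =>
    if a * a < m then sqLoop fuel (a + 1) m
    else decide (a * a = m)

-- B's outer 'while b * b * b <= n' loop over candidate cubes
def bLoop (fuel : Nat) (b n : Int) : Bool :=
  match fuel with
  | 0 => false
  | fuel + 1 =>
    if b * b * b ≤ n then
      if PySem.Int.mod n (b * b * b) = 0 then
        let m := PySem.Int.floordiv n (b * b * b)
        if sqLoop m.toNat 1 m then true else bLoop fuel (b + 1) n
      else bLoop fuel (b + 1) n
    else false

def is_powerful_number_alt (n : Int) : Bool := bLoop n.toNat 1 n

-- ===== PRECONDITION & SPEC =====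
-- Pre_ excludes exactly the non-positive inputs, where Python A raises ValueError (and B raises too)
def Pre_is_powerful_number (n : Int) : Prop := 1 ≤ n
instance (n : Int) : Decidable (Pre_is_powerful_number n) := by unfold Pre_is_powerful_number; infer_instance
def pvWitness_is_powerful_number : Int := (72)

def Spec_is_powerful_number (n : Int) (out : Bool) : Prop := out = is_powerful_number_alt n
instance (n : Int) (out : Bool) : Decidable (Spec_is_powerful_number n out) := by unfold Spec_is_powerful_number; infer_instance

-- ===== CLAIM (what is proved, stated in full; the proofs are below) =====
def Claim_equal_is_powerful_number : Prop := ∀ (n : Int), Dom_is_powerful_number n → Pre_is_powerful_number n → Spec_is_powerful_number n (is_powerful_number n)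

-- ===== LEMMAS AND PROOFS =====

def PowNat (m : ℕ) : Prop := ∀ q : ℕ, q.Prime → q ∣ m → q * q ∣ m
def RepNat (m : ℕ) : Prop := ∃ a b : ℕ, 1 ≤ a ∧ 1 ≤ b ∧ m = a * a * (b * b * b)

theorem pow_of_rep (m : ℕ) (h : RepNat m) : PowNat m := by
  obtain ⟨a, b, _, _, rfl⟩ := h
  intro q hq hqd
  rcases hq.dvd_mul.1 hqd with h1 | h1
  · have hqa : q ∣ a := (hq.dvd_mul.1 h1).elim id id
    exact Dvd.dvd.mul_right (mul_dvd_mul hqa hqa) _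
  · have hqb : q ∣ b := (hq.dvd_mul.1 h1).elim (fun h2 => (hq.dvd_mul.1 h2).elim id id) id
    exact dvd_mul_of_dvd_right ((mul_dvd_mul hqb hqb).trans ⟨b, rfl⟩) _

theorem rep_of_pow (m : ℕ) (hm : 1 ≤ m) (h : PowNat m) : RepNat m := by
  induction m using Nat.strong_induction_on with
  | _ m ih =>
    rcases eq_or_lt_of_le hm with h1 | h1
    · exact ⟨1, 1, le_refl 1, le_refl 1, by omega⟩
    · have hp : m.minFac.Prime := Nat.minFac_prime (by omega)
      set p := m.minFac with hpdef
      have hpd : p ∣ m := Nat.minFac_dvd m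
      have hp2 : 2 ≤ p := hp.two_le
      have he2 : 2 ≤ m.factorization p :=
        (hp.pow_dvd_iff_le_factorization (by omega)).1 (by rw [pow_two]; exact h p hp hpd)
      obtain ⟨e, he⟩ : ∃ e, m.factorization p = e := ⟨_, rfl⟩
      rw [he] at he2
      have hdvd : p ^ e ∣ m := he ▸ Nat.ordProj_dvd m p
      have hnd : ¬ p ∣ m / p ^ e := by
        have := Nat.not_dvd_ordCompl hp (show m ≠ 0 by omega)
        rwa [he] at this
      set m' := m / p ^ e with hm'def
      have hmm : m = p ^ e * m' := (Nat.mul_div_cancel' hdvd).symm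
      have hm'1 : 1 ≤ m' := by
        rcases Nat.eq_zero_or_pos m' with h0 | h0
        · rw [h0, mul_zero] at hmm; omega
        · exact h0
      have hpe : 2 ≤ p ^ e := le_trans hp2 (Nat.le_self_pow (by omega) p)
      have hlt : m' < m := by nlinarith
      have hPm' : PowNat m' := by
        intro q hq hqd
        have hqm : q ∣ m := hqd.trans ⟨p ^ e, by rw [hmm]; ring⟩
        have hdd : q * q ∣ p ^ e * m' := hmm ▸ h q hq hqm
        have hqp : q ≠ p := fun hh => hnd (hh ▸ hqd)
        have hcop : Nat.Coprime q p := (Nat.coprime_primes hq hp).2 hqp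
        exact (Nat.Coprime.mul_left (hcop.pow_right e) (hcop.pow_right e)).dvd_of_dvd_mul_left hdd
      obtain ⟨a, b, ha, hb, hab⟩ := ih m' hlt hm'1 hPm'
      obtain ⟨x, y, hxy⟩ : ∃ x y, e = 2 * x + 3 * y := ⟨(e - 3 * (e % 2)) / 2, e % 2, by omega⟩
      refine ⟨a * p ^ x, b * p ^ y, Nat.mul_pos ha (pow_pos (by omega) x),
        Nat.mul_pos hb (pow_pos (by omega) y), ?_⟩
      rw [hmm, hab, hxy]
      ring

-- no prime below p divides T
def NoSmall (p : Int) (T : ℕ) : Prop := ∀ q : ℕ, q.Prime → (q : Int) < p → ¬ q ∣ T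

theorem int_dvd_iff_toNat (a b : Int) (ha : 0 ≤ a) (hb : 0 ≤ b) :
    a ∣ b ↔ a.toNat ∣ b.toNat := by
  rw [← Int.natCast_dvd_natCast, Int.toNat_of_nonneg ha, Int.toNat_of_nonneg hb]

theorem stripFactor_spec (fuel : Nat) (p temp count : Int) (hp : 2 ≤ p)
    (ht : 1 ≤ temp) (hf : temp ≤ (fuel : Int)) :
    ∃ k : ℕ, (stripFactor fuel p temp count).1 = count + k ∧
      temp = p ^ k * (stripFactor fuel p temp count).2 ∧
      ¬ p ∣ (stripFactor fuel p temp count).2 ∧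
      1 ≤ (stripFactor fuel p temp count).2 := by
  induction fuel generalizing temp count with
  | zero => exfalso; push_cast at hf; omega
  | succ fuel ih =>
    rw [stripFactor]
    by_cases hm : PySem.Int.mod temp p = 0
    · rw [if_pos hm]
      have hdvd : p ∣ temp := (PySem.Int.mod_eq_zero_iff_dvd temp p).1 hm
      have ht' : PySem.Int.floordiv temp p * p = temp := by
        rw [PySem.Int.floordiv_eq_ediv_of_pos (by omega)]
        exact Int.ediv_mul_cancel hdvd
      set t' := PySem.Int.floordiv temp p with ht'def
      have ht'1 : 1 ≤ t' := by nlinarith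
      have h2t : 2 * t' ≤ temp := by nlinarith
      obtain ⟨k, hk1, hk2, hk3, hk4⟩ :=
        ih t' (count + 1) ht'1 (by push_cast at hf ⊢; omega)
      refine ⟨k + 1, by rw [hk1]; push_cast; ring, ?_, hk3, hk4⟩
      calc temp = t' * p := ht'.symm
        _ = (p ^ k * (stripFactor fuel p t' (count + 1)).2) * p := by
              conv_lhs => rw [hk2]
        _ = p ^ (k + 1) * (stripFactor fuel p t' (count + 1)).2 := by ring
    · rw [if_neg hm]
      exact ⟨0, by simp, by simp, fun h => hm ((PySem.Int.mod_eq_zero_iff_dvd temp p).2 h), ht⟩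

theorem prime_of_noSmall (p temp : Int) (hp : 2 ≤ p) (ht : 1 ≤ temp)
    (hpd : p ∣ temp) (hs : NoSmall p temp.toNat) : p.toNat.Prime := by
  have hP2 : 2 ≤ p.toNat := by omega
  have hq : p.toNat.minFac.Prime := Nat.minFac_prime (by omega)
  have hqd : p.toNat.minFac ∣ temp.toNat :=
    (Nat.minFac_dvd _).trans ((int_dvd_iff_toNat p temp (by omega) (by omega)).1 hpd)
  have hqle : p.toNat.minFac ≤ p.toNat := Nat.minFac_le (by omega)
  have : ¬ ((p.toNat.minFac : Int) < p) := fun h => hs _ hq h hqd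
  have heq : p.toNat.minFac = p.toNat := by omega
  rwa [heq] at hq

theorem terminal_iff (p temp : Int) (hp : 2 ≤ p) (ht : 1 ≤ temp)
    (hlt : temp < p * p) (hs : NoSmall p temp.toNat) :
    (temp = 1 ↔ PowNat temp.toNat) := by
  constructor
  · rintro rfl
    intro q hq hqd
    simp at hqd
    exact absurd (hqd ▸ hq) Nat.not_prime_one
  · intro hPow
    by_contra hne
    have hT2 : 2 ≤ temp.toNat := by omega
    have hq : temp.toNat.minFac.Prime := Nat.minFac_prime (by omega)
    have hqd : temp.toNat.minFac ∣ temp.toNat := Nat.minFac_dvd _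
    have hple : p ≤ (temp.toNat.minFac : Int) := by
      by_contra hlt2
      exact hs _ hq (by omega) hqd
    have hqq : temp.toNat.minFac * temp.toNat.minFac ∣ temp.toNat :=
      hPow _ hq hqd
    have hle : temp.toNat.minFac * temp.toNat.minFac ≤ temp.toNat :=
      Nat.le_of_dvd (by omega) hqq
    have hcast : (temp.toNat : Int) = temp := Int.toNat_of_nonneg (by omega)
    have : p * p ≤ (temp.toNat.minFac : Int) * (temp.toNat.minFac : Int) :=
      mul_le_mul hple hple (by omega) (by omega)
    have : ((temp.toNat.minFac * temp.toNat.minFac : ℕ) : Int) ≤ temp := by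
      rw [← hcast]; exact_mod_cast hle
    push_cast at this
    nlinarith

theorem strip_pow_iff (T P T' : ℕ) (k : ℕ) (hk : 2 ≤ k) (hP : P.Prime)
    (hT : T = P ^ k * T') (hnd : ¬ P ∣ T') :
    (PowNat T ↔ PowNat T') := by
  constructor
  · intro h q hq hqd
    have hqT : q ∣ T := hqd.trans ⟨P ^ k, by rw [hT]; ring⟩
    have hdd : q * q ∣ P ^ k * T' := hT ▸ h q hq hqT
    have hqp : q ≠ P := fun hh => hnd (hh ▸ hqd)
    have hcop : Nat.Coprime q P := (Nat.coprime_primes hq hP).2 hqp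
    exact (Nat.Coprime.mul_left (hcop.pow_right k) (hcop.pow_right k)).dvd_of_dvd_mul_left hdd
  · intro h q hq hqd
    rw [hT] at hqd ⊢
    rcases hq.dvd_mul.1 hqd with h1 | h1
    · have hqP : q = P := (Nat.prime_dvd_prime_iff_eq hq hP).1 (hq.dvd_of_dvd_pow h1)
      subst hqP
      exact dvd_mul_of_dvd_left (by rw [← pow_two]; exact pow_dvd_pow q hk) _
    · exact dvd_mul_of_dvd_right ((h q hq h1).trans dvd_rfl) _

theorem loopA_iff (fuel : Nat) (p temp : Int) (hp : 2 ≤ p) (ht : 1 ≤ temp)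
    (hf : temp < (fuel : Int) + p * p) (hs : NoSmall p temp.toNat) :
    (loopA fuel p temp = true ↔ PowNat temp.toNat) := by
  induction fuel generalizing p temp with
  | zero =>
    rw [loopA]
    simp only [decide_eq_true_eq]
    exact terminal_iff p temp hp ht (by push_cast at hf; omega) hs
  | succ fuel ih =>
    rw [loopA]
    by_cases hpp : p * p ≤ temp
    · rw [if_pos hpp]
      by_cases hm : PySem.Int.mod temp p = 0
      · rw [if_pos hm]
        change (if (stripFactor temp.toNat p temp 0).1 < 2 then false
          else loopA fuel (p + 1) (stripFactor temp.toNat p temp 0).2) = true ↔ _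
        have hdvd : p ∣ temp := (PySem.Int.mod_eq_zero_iff_dvd temp p).1 hm
        have hPp : p.toNat.Prime := prime_of_noSmall p temp hp ht hdvd hs
        obtain ⟨k, hk1, hk2, hk3, hk4⟩ :=
          stripFactor_spec temp.toNat p temp 0 hp ht (by rw [Int.toNat_of_nonneg (by omega)])
        set t := (stripFactor temp.toNat p temp 0).2 with htdef
        have hk1' : (stripFactor temp.toNat p temp 0).1 = (k : Int) := by rw [hk1]; ring
        have hkpos : 1 ≤ k := by
          rcases Nat.eq_zero_or_pos k with h0 | h0
          · exfalso; rw [h0, pow_zero, one_mul] at hk2; exact hk3 (hk2 ▸ hdvd)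
          · exact h0
        have h2c : ((temp.toNat : Int)) = temp := Int.toNat_of_nonneg (by omega)
        have h2p : ((p.toNat : Int)) = p := Int.toNat_of_nonneg (by omega)
        have h2t : ((t.toNat : Int)) = t := Int.toNat_of_nonneg (by omega)
        have hTnat : temp.toNat = p.toNat ^ k * t.toNat := by
          have hc : ((p.toNat : Int)) ^ k * ((t.toNat : Int)) = ((temp.toNat : Int)) := by
            rw [h2p, h2t, h2c]; exact hk2.symm
          exact_mod_cast hc.symm
        rw [hk1']
        by_cases hk2c : (k : Int) < 2
        · rw [if_pos hk2c]
          simp only [Bool.false_eq_true, false_iff]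
          intro hPow
          have hk1eq : k = 1 := by omega
          rw [hk1eq, pow_one] at hTnat
          have hPd : p.toNat ∣ temp.toNat := ⟨t.toNat, hTnat⟩
          have hPP : p.toNat * p.toNat ∣ p.toNat * t.toNat := hTnat ▸ hPow _ hPp hPd
          have hPt : p.toNat ∣ t.toNat :=
            (Nat.mul_dvd_mul_iff_left (show 0 < p.toNat by omega)).1 hPP
          exact hk3 ((int_dvd_iff_toNat p t (by omega) (by omega)).2 hPt)
        · rw [if_neg hk2c]
          have hkk : 2 ≤ k := by omega
          have honep : (1 : Int) ≤ p ^ k := pow_pos (show (0:Int) < p by omega) k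
          have htle : t ≤ temp := by nlinarith
          rw [ih (p + 1) t (by omega) hk4 (by push_cast at hf ⊢; nlinarith) ?_]
          · exact (strip_pow_iff temp.toNat p.toNat t.toNat k hkk hPp hTnat
              (fun h => hk3 ((int_dvd_iff_toNat p t (by omega) (by omega)).2 h))).symm
          · intro q hq hql hqd
            rcases lt_or_eq_of_le (show (q : Int) ≤ p by omega) with h | h
            · exact hs q hq h (hqd.trans ⟨p.toNat ^ k, by rw [hTnat]; ring⟩)
            · apply hk3
              have hq' : (q : Int) ∣ t := by
                have := (int_dvd_iff_toNat (q : Int) t (by positivity) (by omega)).2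
                simp only [Int.toNat_natCast] at this
                exact this hqd
              rwa [h] at hq'
      · rw [if_neg hm]
        apply ih (p + 1) temp (by omega) ht (by push_cast at hf ⊢; nlinarith)
        intro q hq hql
        rcases lt_or_eq_of_le (show (q : Int) ≤ p by omega) with h | h
        · exact hs q hq h
        · intro hqd
          apply hm
          rw [PySem.Int.mod_eq_zero_iff_dvd, ← h]
          have := (int_dvd_iff_toNat (q : Int) temp (by positivity) (by omega)).2
          simp only [Int.toNat_natCast] at this
          exact this hqd
    · rw [if_neg hpp]
      simp only [decide_eq_true_eq]
      exact terminal_iff p temp hp ht (by omega) hs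

theorem sqLoop_iff (fuel : Nat) (a m : Int) (ha : 1 ≤ a) (hf : m < (fuel : Int) + a) :
    (sqLoop fuel a m = true ↔ ∃ c : Int, a ≤ c ∧ c * c = m) := by
  induction fuel generalizing a with
  | zero =>
    simp only [sqLoop, decide_eq_true_eq, Nat.cast_zero, zero_add] at *
    constructor
    · exact fun h => ⟨a, le_refl a, h⟩
    · rintro ⟨c, hc, rfl⟩
      nlinarith
  | succ fuel ih =>
    rw [sqLoop]
    by_cases hlt : a * a < m
    · rw [if_pos hlt, ih (a + 1) (by omega) (by push_cast at hf ⊢; omega)]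
      constructor
      · rintro ⟨c, hc, rfl⟩; exact ⟨c, by omega, rfl⟩
      · rintro ⟨c, hc, rfl⟩
        refine ⟨c, ?_, rfl⟩
        rcases eq_or_lt_of_le hc with h | h
        · exact absurd hlt (by rw [h]; exact lt_irrefl _)
        · omega
    · rw [if_neg hlt]
      simp only [decide_eq_true_eq]
      constructor
      · exact fun h => ⟨a, le_refl a, h⟩
      · rintro ⟨c, hc, rfl⟩
        rcases eq_or_lt_of_le hc with h | h
        · rw [h]
        · nlinarith

theorem bLoop_iff (fuel : Nat) (b n : Int) (hb : 1 ≤ b) (hn : 1 ≤ n)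
    (hf : n < (fuel : Int) + b) :
    (bLoop fuel b n = true ↔ ∃ a c : Int, 1 ≤ a ∧ b ≤ c ∧ n = a * a * (c * c * c)) := by
  induction fuel generalizing b with
  | zero =>
    simp only [bLoop, Bool.false_eq_true, false_iff, Nat.cast_zero, zero_add] at *
    rintro ⟨a, c, ha, hc, rfl⟩
    have hc1 : (1 : Int) ≤ c := le_trans hb hc
    have h1 : (1 : Int) ≤ a * a := by nlinarith
    have h2 : c ≤ c * c * c := by nlinarith
    nlinarith
  | succ fuel ih =>
    rw [bLoop]
    by_cases hb3 : b * b * b ≤ n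
    · rw [if_pos hb3]
      by_cases hdv : PySem.Int.mod n (b * b * b) = 0
      · rw [if_pos hdv]
        have hcpos : (0 : Int) < b * b * b := by positivity
        have hdvd : b * b * b ∣ n := (PySem.Int.mod_eq_zero_iff_dvd n (b * b * b)).1 hdv
        set m := PySem.Int.floordiv n (b * b * b) with hmdef
        have hm : m * (b * b * b) = n := by
          rw [hmdef, PySem.Int.floordiv_eq_ediv_of_pos hcpos]
          exact Int.ediv_mul_cancel hdvd
        have hm1 : 1 ≤ m := by nlinarith
        have hmnat : ((m.toNat : Int)) = m := Int.toNat_of_nonneg (by omega)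
        change (if sqLoop m.toNat 1 m = true then true else bLoop fuel (b + 1) n) = true ↔ _
        by_cases hsb : sqLoop m.toNat 1 m = true
        · rw [if_pos hsb]
          simp only [true_iff]
          obtain ⟨c, hc1, hc2⟩ := (sqLoop_iff m.toNat 1 m (le_refl 1) (by omega)).1 hsb
          exact ⟨c, b, hc1, le_refl b, by rw [← hm, ← hc2]⟩
        · rw [if_neg hsb]
          have hsq : ¬ ∃ c : Int, 1 ≤ c ∧ c * c = m :=
            fun h => hsb ((sqLoop_iff m.toNat 1 m (le_refl 1) (by omega)).2 h)
          rw [ih (b + 1) (by omega) (by push_cast at hf ⊢; omega)]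
          constructor
          · rintro ⟨a, c, ha, hc, rfl⟩; exact ⟨a, c, ha, by omega, rfl⟩
          · rintro ⟨a, c, ha, hc, hrep⟩
            refine ⟨a, c, ha, ?_, hrep⟩
            rcases eq_or_lt_of_le hc with h | h
            · exfalso
              apply hsq
              refine ⟨a, ha, ?_⟩
              have : a * a * (b * b * b) = m * (b * b * b) := by rw [hm, hrep, h]
              exact mul_right_cancel₀ (by omega) this
            · omega
      · rw [if_neg hdv]
        rw [ih (b + 1) (by omega) (by push_cast at hf ⊢; omega)]
        constructor
        · rintro ⟨a, c, ha, hc, rfl⟩; exact ⟨a, c, ha, by omega, rfl⟩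
        · rintro ⟨a, c, ha, hc, hrep⟩
          refine ⟨a, c, ha, ?_, hrep⟩
          rcases eq_or_lt_of_le hc with h | h
          · exfalso
            apply hdv
            rw [PySem.Int.mod_eq_zero_iff_dvd]
            exact ⟨a * a, by rw [hrep, h]; ring⟩
          · omega
    · rw [if_neg hb3]
      simp only [Bool.false_eq_true, false_iff]
      rintro ⟨a, c, ha, hc, rfl⟩
      have hc1 : (1 : Int) ≤ c := le_trans hb hc
      have h1 : (1 : Int) ≤ a * a := by nlinarith
      have hbb : b * b ≤ c * c := mul_le_mul hc hc (by omega) (by omega)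
      have h2 : b * b * b ≤ c * c * c := mul_le_mul hbb hc (by omega) (by positivity)
      nlinarith


theorem noSmall_two (T : ℕ) : NoSmall 2 T := by
  intro q hq hql
  exact absurd hq.two_le (by omega)

theorem rep_int_iff (n : Int) (hn : 1 ≤ n) :
    (RepNat n.toNat ↔ ∃ a c : Int, 1 ≤ a ∧ 1 ≤ c ∧ n = a * a * (c * c * c)) := by
  have hc : ((n.toNat : Int)) = n := Int.toNat_of_nonneg (by omega)
  constructor
  · rintro ⟨a, b, ha, hb, hab⟩
    refine ⟨(a : Int), (b : Int), by exact_mod_cast ha, by exact_mod_cast hb, ?_⟩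
    rw [← hc]
    exact_mod_cast congrArg (Nat.cast : ℕ → Int) hab
  · rintro ⟨a, c, ha, hcc, hrep⟩
    refine ⟨a.toNat, c.toNat, by omega, by omega, ?_⟩
    have h2a : ((a.toNat : Int)) = a := Int.toNat_of_nonneg (by omega)
    have h2c : ((c.toNat : Int)) = c := Int.toNat_of_nonneg (by omega)
    have : ((a.toNat * a.toNat * (c.toNat * c.toNat * c.toNat) : ℕ) : Int) = ((n.toNat : Int)) := by
      push_cast [h2a, h2c]
      rw [hc]
      exact hrep.symm
    exact_mod_cast this.symm

-- ===== VERDICT (by name: the statement is the Claim_ definition above) =====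
theorem is_powerful_number_spec : Claim_equal_is_powerful_number := by
  intro n _ hpre
  unfold Spec_is_powerful_number is_powerful_number is_powerful_number_alt Pre_is_powerful_number at *
  have hc : ((n.toNat : Int)) = n := Int.toNat_of_nonneg (by omega)
  have hB := bLoop_iff n.toNat 1 n (le_refl 1) hpre (by omega)
  by_cases h1 : n = 1
  · rw [if_pos h1]
    symm
    rw [hB]
    exact ⟨1, 1, le_refl 1, le_refl 1, by omega⟩
  · rw [if_neg h1]
    have hA := loopA_iff n.toNat 2 n (le_refl 2) hpre (by omega) (noSmall_two n.toNat)
    rw [Bool.eq_iff_iff, hA, hB, ← rep_int_iff n hpre]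
    exact ⟨fun h => rep_of_pow n.toNat (by omega) h, fun h => pow_of_rep n.toNat h⟩
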